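-- pv_equiv track=rewrite | github.com/JozefTkocz/Advent-of-Code | AoC2023/aoc2023/day_3.py | get_chars_at_positions
-- ===== SOURCE A (Python) =====
-- def get_chars_at_positions(string: str, indices: list[bool]) -> list[str]:
--     results = []
--     current_result = []
--     for idx in range(len(indices)):
--         if indices[idx]:
--             current_result.append(string[idx])
--         elif current_result and not indices[idx]:
--             results.append("".join(current_result))
--             current_result = []
--         elif not indices[idx]:
--             pass
--     if current_result:
--         results.append("".join(current_result))
--     return results
-- ===== SOURCE B (Python) =====
-- _SEP = "\x00"  # never occurs in the (printable-ASCII + tab/newline/CR) input domain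
--
--
-- def get_chars_at_positions(string: str, indices: list[bool]) -> list[str]:
--     # Stage 1: render the mask into a single string, putting a sentinel at
--     # every masked-out position (string is only indexed at True positions).
--     marked = "".join(string[i] if indices[i] else _SEP for i in range(len(indices)))
--     # Stage 2: the kept runs are exactly the nonempty pieces between sentinels.
--     return [piece for piece in marked.split(_SEP) if piece]
-- ===== Notes on version B (the rewrite author's own statement) =====
-- stated objective: alternative
-- what changed: Replaces A's single-pass accumulator state machine (current_result/results with flush-on-False branches) by two stateless staged passes: render the mask into one string with a '\x00' sentinel at False positions, then split on the sentinel and keep the nonempty pieces.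
import Mathlib
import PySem

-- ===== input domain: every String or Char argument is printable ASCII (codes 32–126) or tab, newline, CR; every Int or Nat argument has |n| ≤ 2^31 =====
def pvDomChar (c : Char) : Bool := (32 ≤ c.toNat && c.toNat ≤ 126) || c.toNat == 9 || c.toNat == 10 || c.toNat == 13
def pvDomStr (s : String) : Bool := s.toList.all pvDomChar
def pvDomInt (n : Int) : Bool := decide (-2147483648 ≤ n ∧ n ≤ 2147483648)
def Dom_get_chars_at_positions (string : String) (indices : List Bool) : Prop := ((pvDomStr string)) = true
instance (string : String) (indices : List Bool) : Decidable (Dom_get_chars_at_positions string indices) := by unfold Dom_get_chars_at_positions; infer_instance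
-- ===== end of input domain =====

-- B replaces A's accumulator state machine by two stateless passes: mark False positions
-- with a '\x00' sentinel, then split on the sentinel and keep nonempty pieces
-- (objective: alternative; same linear cost).

-- ===== PORT A =====
-- 'string[idx]' is ported as string.toList.getD idx ' ' — exact under Pre_ (Python raises
-- IndexError when a True position is ≥ len(string); those inputs are excluded by Pre_);
-- 'indices[idx]' is always in range since idx < len(indices).
def get_chars_at_positions (string : String) (indices : List Bool) : List String :=
  let r := (List.range indices.length).foldl
    (fun (st : List String × List Char) idx =>
      if indices.getD idx false then
        (st.1, st.2 ++ [string.toList.getD idx ' '])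
      else if st.2 ≠ [] ∧ indices.getD idx false = false then
        (st.1 ++ [String.ofList st.2], [])
      else  -- 'elif not indices[idx]: pass' (and falling off the chain): state unchanged
        st)
    ([], [])
  if r.2 ≠ [] then r.1 ++ [String.ofList r.2] else r.1

-- ===== PORT B =====
-- Python's str.split(sep) with a one-character separator, keeping empty pieces.
def pvSplit (sep : Char) : List Char → List (List Char)
  | [] => [[]]
  | c :: rest =>
      if c = sep then [] :: pvSplit sep rest
      else
        match pvSplit sep rest with
        | [] => [[c]]          -- unreachable: pvSplit never returns []
        | p :: ps => (c :: p) :: ps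

-- Stage 1 builds the marked string ('string[i]' exact under Pre_, as in port A);
-- stage 2 splits on the sentinel and keeps the nonempty pieces.
def get_chars_at_positions_alt (string : String) (indices : List Bool) : List String :=
  let marked := (List.range indices.length).map
    (fun i => if indices.getD i false then string.toList.getD i ' ' else '\x00')
  (pvSplit '\x00' marked).filterMap
    (fun p => if p ≠ [] then some (String.ofList p) else none)

-- ===== PRECONDITION & SPEC =====
-- Pre_ excludes exactly the inputs where some True mask position is ≥ len(string):
-- there BOTH A and B raise IndexError (no return value exists to match).
def Pre_get_chars_at_positions (string : String) (indices : List Bool) : Prop :=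
  ∀ i ∈ List.range indices.length, indices.getD i false = true → i < string.toList.length

instance (string : String) (indices : List Bool) : Decidable (Pre_get_chars_at_positions string indices) := by
  unfold Pre_get_chars_at_positions; infer_instance

def pvWitness_get_chars_at_positions : String × List Bool := ("ab7.x", [true, true, false, true, false])

def Spec_get_chars_at_positions (string : String) (indices : List Bool) (out : List String) : Prop := out = get_chars_at_positions_alt string indices
instance (string : String) (indices : List Bool) (out : List String) : Decidable (Spec_get_chars_at_positions string indices out) := by unfold Spec_get_chars_at_positions; infer_instance

-- ===== CLAIM (what is proved, stated in full; the proofs are below) =====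
def Claim_equal_get_chars_at_positions : Prop := ∀ (string : String) (indices : List Bool), Dom_get_chars_at_positions string indices → Pre_get_chars_at_positions string indices → Spec_get_chars_at_positions string indices (get_chars_at_positions string indices)

-- ===== LEMMAS AND PROOFS =====

-- Middle form of A: forward recursion producing the finished groups directly.
def pvGo {α : Type} (key : α → Bool) (chr : α → Char) : List Char → List α → List String
  | cur, [] => if cur ≠ [] then [String.ofList cur] else []
  | cur, x :: l =>
      if key x then pvGo key chr (cur ++ [chr x]) l
      else (if cur ≠ [] then [String.ofList cur] else []) ++ pvGo key chr [] l

-- A's final flush of the current group.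
def pvFin (r : List String × List Char) : List String :=
  if r.2 ≠ [] then r.1 ++ [String.ofList r.2] else r.1

-- A's fold, from any state, equals the middle form.
theorem pvFoldl_go {α : Type} (key : α → Bool) (chr : α → Char) :
    ∀ (l : List α) (res : List String) (cur : List Char),
      pvFin (l.foldl
        (fun (st : List String × List Char) x =>
          if key x then (st.1, st.2 ++ [chr x])
          else if st.2 ≠ [] ∧ key x = false then (st.1 ++ [String.ofList st.2], [])
          else st) (res, cur)) = res ++ pvGo key chr cur l := by
  intro l
  induction l with
  | nil =>
      intro res cur
      by_cases h : cur = [] <;> simp [pvFin, pvGo, h]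
  | cons x l ih =>
      intro res cur
      simp only [List.foldl_cons]
      by_cases hk : key x
      · rw [if_pos hk, ih res (cur ++ [chr x])]
        simp [pvGo, hk]
      · rw [if_neg hk]
        by_cases hc : cur = []
        · rw [if_neg (by simp [hc]), ih res cur]
          subst hc
          simp [pvGo, hk]
        · rw [if_pos ⟨hc, by simpa using hk⟩, ih (res ++ [String.ofList cur]) []]
          simp [pvGo, hk, hc]

-- Splitting a separator-free list yields that one piece.
theorem pvSplit_sepfree (sep : Char) :
    ∀ (l : List Char), (∀ c ∈ l, c ≠ sep) → pvSplit sep l = [l] := by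
  intro l
  induction l with
  | nil => intro _; rfl
  | cons c l ih =>
      intro h
      have hc : c ≠ sep := h c (by simp)
      simp only [pvSplit, if_neg hc, ih (fun d hd => h d (by simp [hd]))]

-- A separator after a separator-free prefix closes exactly that piece.
theorem pvSplit_append_sep (sep : Char) :
    ∀ (l r : List Char), (∀ c ∈ l, c ≠ sep) →
      pvSplit sep (l ++ sep :: r) = l :: pvSplit sep r := by
  intro l
  induction l with
  | nil => intro r _; simp [pvSplit]
  | cons c l ih =>
      intro r h
      have hc : c ≠ sep := h c (by simp)
      simp only [List.cons_append, pvSplit, if_neg hc,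
        ih r (fun d hd => h d (by simp [hd]))]

-- The middle form equals B's split-then-filter over the marked list.
theorem pvGo_split {α : Type} (key : α → Bool) (chr : α → Char) (sep : Char)
    (hchr : ∀ x, chr x ≠ sep) :
    ∀ (l : List α) (cur : List Char), (∀ c ∈ cur, c ≠ sep) →
      pvGo key chr cur l =
        (pvSplit sep (cur ++ l.map (fun x => if key x then chr x else sep))).filterMap
          (fun p => if p ≠ [] then some (String.ofList p) else none) := by
  intro l
  induction l with
  | nil =>
      intro cur hcur
      rw [List.map_nil, List.append_nil, pvSplit_sepfree sep cur hcur]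
      by_cases h : cur = [] <;> simp [pvGo, h]
  | cons x l ih =>
      intro cur hcur
      by_cases hk : key x
      · have h' : ∀ c ∈ cur ++ [chr x], c ≠ sep := by
          intro c hc
          rcases List.mem_append.1 hc with h | h
          · exact hcur c h
          · simp at h; subst h; exact hchr x
        simp only [pvGo, hk, if_true, List.map_cons, ih (cur ++ [chr x]) h']
        simp
      · simp only [pvGo, hk, Bool.false_eq_true, if_false, List.map_cons,
          ih [] (by simp)]
        rw [pvSplit_append_sep sep cur _ hcur]
        by_cases h : cur = [] <;> simp [h]

-- Under Dom, no character produced from the string (or the ' ' default) is the sentinel.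
theorem pvChr_ne_sep (string : String) (hd : pvDomStr string = true) :
    ∀ i : ℕ, string.toList.getD i ' ' ≠ '\x00' := by
  intro i
  by_cases h : i < string.toList.length
  · rw [List.getD_eq_getElem _ _ h]
    intro he
    have := (List.all_eq_true.1 hd) _ (List.getElem_mem h)
    rw [he] at this
    simp [pvDomChar] at this
  · rw [List.getD_eq_default _ _ (Nat.le_of_not_lt h)]
    decide

-- ===== VERDICT (by name: the statement is the Claim_ definition above) =====
theorem get_chars_at_positions_spec : Claim_equal_get_chars_at_positions := by
  intro string indices hdom _
  unfold Spec_get_chars_at_positions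
  have hb := pvGo_split (fun i => indices.getD i false) (fun i => string.toList.getD i ' ')
    '\x00' (pvChr_ne_sep string hdom) (List.range indices.length) [] (by simp)
  have h := pvFoldl_go (fun i => indices.getD i false) (fun i => string.toList.getD i ' ')
    (List.range indices.length) [] []
  simp only [pvFin, List.nil_append] at h hb
  simpa [get_chars_at_positions, get_chars_at_positions_alt] using h.trans hb
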